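-- pv_equiv track=rewrite | github.com/leolavaur/radar-srds-2024 | exps/trustfids/utils/distribution.py | build_distribution_baseline
-- ===== SOURCE A (Python) =====
-- from typing import List
--
-- def build_distribution_baseline(distribution: List[int]) -> List[List[str]]:
--     """return the expected cluster distribution from distribution scalars.
--     Args:
--         distribution: List of scalar reprensenting the distribution of clients.
--     Return:
--         List of List of client_id representing the expected cluster distribution.
--
--     """
--     client_id = 0
--     result = []
--     for silo_size in distribution:
--         l = []
--         for c in range(silo_size):
--             l.append(f"client_{client_id}")
--             client_id += 1
--         result.append(l)
--     return result
-- ===== SOURCE B (Python) =====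
-- from typing import List
-- from itertools import accumulate
--
--
-- def build_distribution_baseline(distribution: List[int]) -> List[List[str]]:
--     # Prefix-sum offset table: cumulative client counts (a negative "size"
--     # contributes no clients), then emit each silo as a positional range.
--     offsets = [0, *accumulate(max(s, 0) for s in distribution)]
--     return [
--         [f"client_{i}" for i in range(lo, hi)]
--         for lo, hi in zip(offsets, offsets[1:])
--     ]
-- ===== Notes on version B (the rewrite author's own statement) =====
-- stated objective: alternative
-- what changed: Replaces the single mutated running client_id counter with a precomputed prefix-sum offset table; each silo's names are then emitted as an independent positional range between consecutive offsets.
import Mathlib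
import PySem

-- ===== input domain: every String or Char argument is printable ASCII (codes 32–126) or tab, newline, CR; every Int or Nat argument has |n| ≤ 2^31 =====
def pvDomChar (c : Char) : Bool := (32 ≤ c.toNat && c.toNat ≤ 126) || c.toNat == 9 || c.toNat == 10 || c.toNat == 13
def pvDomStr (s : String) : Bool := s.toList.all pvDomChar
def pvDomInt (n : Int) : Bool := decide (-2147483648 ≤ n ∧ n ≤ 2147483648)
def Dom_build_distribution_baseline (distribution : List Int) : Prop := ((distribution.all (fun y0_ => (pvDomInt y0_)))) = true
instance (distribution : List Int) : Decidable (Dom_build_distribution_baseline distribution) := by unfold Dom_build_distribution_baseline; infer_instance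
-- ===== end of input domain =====

-- B replaces A's running client_id counter by a prefix-sum offset table read as positional ranges (alternative decomposition, same cost).


-- ===== PORT A =====
def build_distribution_baseline (distribution : List Int) : List (List String) :=
  (distribution.foldl
    (fun (st : Int × List (List String)) silo_size =>
      let inner := (PySem.List.pyRange 0 silo_size 1).foldl
        (fun (p : Int × List String) _c => (p.1 + 1, p.2 ++ ["client_" ++ PySem.Int.toStr p.1]))
        (st.1, ([] : List String))
      (inner.1, st.2 ++ [inner.2]))
    (0, [])).2

-- ===== PORT B =====
def pvOffsets (distribution : List Int) : List Int :=
  distribution.scanl (fun a s => a + max s 0) 0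

def build_distribution_baseline_alt (distribution : List Int) : List (List String) :=
  ((pvOffsets distribution).zip (pvOffsets distribution).tail).map
    (fun p => (PySem.List.pyRange p.1 p.2 1).map (fun i => "client_" ++ PySem.Int.toStr i))

-- ===== PRECONDITION & SPEC =====
def Spec_build_distribution_baseline (distribution : List Int) (out : List (List String)) : Prop := out = build_distribution_baseline_alt distribution
instance (distribution : List Int) (out : List (List String)) : Decidable (Spec_build_distribution_baseline distribution out) := by unfold Spec_build_distribution_baseline; infer_instance

-- ===== CLAIM (what is proved, stated in full; the proofs are below) =====
def Claim_equal_build_distribution_baseline : Prop := ∀ (distribution : List Int), Dom_build_distribution_baseline distribution → Spec_build_distribution_baseline distribution (build_distribution_baseline distribution)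

-- ===== LEMMAS AND PROOFS =====

-- the name of client k
def pvName (i : Int) : String := "client_" ++ PySem.Int.toStr i

-- A's inner loop, characterised over List.range
theorem pv_inner_range (m : Nat) (c : Int) (acc : List String) :
    (List.range m).foldl
      (fun (p : Int × List String) _c => (p.1 + 1, p.2 ++ ["client_" ++ PySem.Int.toStr p.1]))
      (c, acc)
    = (c + m, acc ++ (List.range m).map (fun k : Nat => pvName (c + (k : Int)))) := by
  induction m generalizing c acc with
  | zero => simp [pvName]
  | succ m ih =>
      rw [List.range_succ, List.foldl_append, ih, List.map_append]
      simp [pvName]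
      omega

-- A's inner loop over pyRange 0 n 1
theorem pv_inner (n c : Int) :
    (PySem.List.pyRange 0 n 1).foldl
      (fun (p : Int × List String) _c => (p.1 + 1, p.2 ++ ["client_" ++ PySem.Int.toStr p.1]))
      (c, ([] : List String))
    = (c + max n 0, (PySem.List.pyRange c (c + max n 0) 1).map pvName) := by
  rw [PySem.List.pyRange_one, PySem.List.pyRange_one]
  simp only [Int.sub_zero, List.foldl_map]
  rw [pv_inner_range n.toNat c []]
  have h1 : ((n.toNat : Nat) : Int) = max n 0 := by omega
  have h2 : (c + max n 0 - c).toNat = n.toNat := by omega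
  rw [h2, List.map_map]
  simp [h1, Function.comp]

-- B's result, seeded at an arbitrary offset
def pvG (c : Int) (l : List Int) : List (List String) :=
  ((l.scanl (fun a s => a + max s 0) c).zip (l.scanl (fun a s => a + max s 0) c).tail).map
    (fun p => (PySem.List.pyRange p.1 p.2 1).map pvName)

theorem pvG_cons (c d : Int) (ds : List Int) :
    pvG c (d :: ds)
      = (PySem.List.pyRange c (c + max d 0) 1).map pvName :: pvG (c + max d 0) ds := by
  unfold pvG
  rw [List.scanl_cons]
  cases ds with
  | nil => simp
  | cons e es => rw [List.scanl_cons]; simp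

-- A's outer loop equals B's offset-table reading, for any starting counter and accumulator
theorem pv_main (l : List Int) (c : Int) (acc : List (List String)) :
    (l.foldl
      (fun (st : Int × List (List String)) silo_size =>
        let inner := (PySem.List.pyRange 0 silo_size 1).foldl
          (fun (p : Int × List String) _c => (p.1 + 1, p.2 ++ ["client_" ++ PySem.Int.toStr p.1]))
          (st.1, ([] : List String))
        (inner.1, st.2 ++ [inner.2]))
      (c, acc)).2
    = acc ++ pvG c l := by
  induction l generalizing c acc with
  | nil => simp [pvG]
  | cons d ds ih =>
      rw [List.foldl_cons]
      simp only [pv_inner d c]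
      rw [ih, pvG_cons, List.append_assoc]
      simp

theorem pv_names_eq (l : List Int) :
    build_distribution_baseline l = build_distribution_baseline_alt l := by
  unfold build_distribution_baseline build_distribution_baseline_alt pvOffsets
  rw [pv_main l 0 []]
  simp [pvG, pvName]

-- ===== VERDICT (by name: the statement is the Claim_ definition above) =====
theorem build_distribution_baseline_spec : Claim_equal_build_distribution_baseline := by
  intro l _
  unfold Spec_build_distribution_baseline
  exact pv_names_eq l
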